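-- pv_equiv track=rewrite | github.com/xwyan1230/ecDNA_napari-env | analysis1/68_20240307_GFPandmCherry_DNAFISH_MYCandWee1/24_18_summary_individual.py | get_surrounding_points
-- ===== SOURCE A (Python) =====
-- def get_surrounding_points(lst: list, y):
--     out = []
--     for i in range(len(lst)):
--         if (y < lst[i]) & (len(out) == 0):
--             out.append([i-1, lst[i-1]])
--             out.append([i, lst[i]])
--         elif (y > lst[i]) & (len(out) == 2):
--             out.append([i - 1, lst[i - 1]])
--             out.append([i, lst[i]])
--     return out
-- ===== SOURCE B (Python) =====
-- def get_surrounding_points(lst: list, y):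
--     ups = [i for i, v in enumerate(lst) if v > y]
--     if not ups:
--         return []
--     a = min(ups)
--     downs = [i for i, v in enumerate(lst) if v < y and i > a]
--     pairs = [a] if not downs else [a, min(downs)]
--     return [[j, lst[j]] for k in pairs for j in (k - 1, k)]
-- ===== Notes on version B (the rewrite author's own statement) =====
-- stated objective: alternative
-- what changed: A's single stateful loop (result length acts as phase state, with early-pattern appends) is replaced by materialize-and-select: comprehensions collect all indices where the value crosses y upward and (past the first one) downward, min picks the first of each candidate set, and one final comprehension assembles the index/value pairs.
import Mathlib
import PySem

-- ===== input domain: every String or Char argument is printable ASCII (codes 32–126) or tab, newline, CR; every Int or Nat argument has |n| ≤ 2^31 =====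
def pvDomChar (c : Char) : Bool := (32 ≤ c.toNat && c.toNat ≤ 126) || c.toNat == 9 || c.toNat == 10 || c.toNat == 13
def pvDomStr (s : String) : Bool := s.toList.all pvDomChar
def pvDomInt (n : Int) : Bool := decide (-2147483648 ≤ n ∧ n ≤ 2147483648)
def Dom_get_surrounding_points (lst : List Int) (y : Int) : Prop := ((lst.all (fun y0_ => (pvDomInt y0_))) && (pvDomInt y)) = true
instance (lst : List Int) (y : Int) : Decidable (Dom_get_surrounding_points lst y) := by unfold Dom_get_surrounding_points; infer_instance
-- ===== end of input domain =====

-- B replaces A's stateful phase loop by materialize-and-select: comprehensions collect all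
-- upward/downward crossing indices, min picks the first of each, one comprehension builds the
-- output; same return value everywhere, objective: alternative (same cost, different strategy).

-- ===== PORT A =====
-- indices i and i-1 lie in [-1, len-1], where Python indexing never raises, so pyGetD with
-- default 0 is exact here (the default is never used).
def get_surrounding_points (lst : List Int) (y : Int) : List (List Int) :=
  (PySem.List.pyRange 0 (PySem.List.len lst) 1).foldl (fun out i =>
    if y < PySem.List.pyGetD lst i 0 ∧ out.length = 0 then
      (out ++ [[i - 1, PySem.List.pyGetD lst (i - 1) 0]]) ++ [[i, PySem.List.pyGetD lst i 0]]
    else if PySem.List.pyGetD lst i 0 < y ∧ out.length = 2 then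
      (out ++ [[i - 1, PySem.List.pyGetD lst (i - 1) 0]]) ++ [[i, PySem.List.pyGetD lst i 0]]
    else out) []

-- ===== PORT B =====
-- 'if not ups: return []' followed by 'min(ups)' is ported as one match on min? (none ↔ empty).
def get_surrounding_points_alt (lst : List Int) (y : Int) : List (List Int) :=
  let ups := ((PySem.List.enumerate lst 0).filter (fun p => decide (y < p.2))).map (fun p => p.1)
  match PySem.List.min? ups (fun x => x) with
  | none => []
  | some a =>
    let downs := ((PySem.List.enumerate lst 0).filter
        (fun p => decide (p.2 < y ∧ a < p.1))).map (fun p => p.1)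
    let pairs : List Int :=
      match PySem.List.min? downs (fun x => x) with
      | none => [a]
      | some b => [a, b]
    pairs.flatMap (fun k =>
      [[k - 1, PySem.List.pyGetD lst (k - 1) 0], [k, PySem.List.pyGetD lst k 0]])

-- ===== PRECONDITION & SPEC =====
def Spec_get_surrounding_points (lst : List Int) (y : Int) (out : List (List Int)) : Prop := out = get_surrounding_points_alt lst y
instance (lst : List Int) (y : Int) (out : List (List Int)) : Decidable (Spec_get_surrounding_points lst y out) := by unfold Spec_get_surrounding_points; infer_instance

-- ===== CLAIM (what is proved, stated in full; the proofs are below) =====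
def Claim_equal_get_surrounding_points : Prop := ∀ (lst : List Int) (y : Int), Dom_get_surrounding_points lst y → Spec_get_surrounding_points lst y (get_surrounding_points lst y)

-- ===== LEMMAS AND PROOFS =====

-- A's loop body, named for the proofs.
def stepA (lst : List Int) (y : Int) (out : List (List Int)) (i : Int) : List (List Int) :=
  if y < PySem.List.pyGetD lst i 0 ∧ out.length = 0 then
    (out ++ [[i - 1, PySem.List.pyGetD lst (i - 1) 0]]) ++ [[i, PySem.List.pyGetD lst i 0]]
  else if PySem.List.pyGetD lst i 0 < y ∧ out.length = 2 then
    (out ++ [[i - 1, PySem.List.pyGetD lst (i - 1) 0]]) ++ [[i, PySem.List.pyGetD lst i 0]]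
  else out

lemma getA_eq (lst : List Int) (y : Int) :
    get_surrounding_points lst y
      = (PySem.List.pyRange 0 (PySem.List.len lst) 1).foldl (stepA lst y) [] := rfl

-- once the accumulator has four entries, the rest of the loop does nothing
lemma foldl_stepA_len4 (lst : List Int) (y : Int) :
    ∀ (l : List Int) (out : List (List Int)), out.length = 4 →
      l.foldl (stepA lst y) out = out := by
  intro l
  induction l with
  | nil => intro out _; rfl
  | cons i t ih =>
      intro out h
      have hs : stepA lst y out i = out := by simp [stepA, h]
      simp [List.foldl_cons, hs, ih out h]

-- with two entries in the accumulator, the rest of the loop performs exactly phase 2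
lemma foldl_stepA_len2 (lst : List Int) (y : Int) :
    ∀ (l : List Int) (out : List (List Int)), out.length = 2 →
      l.foldl (stepA lst y) out =
        (match l.find? (fun i => decide (PySem.List.pyGetD lst i 0 < y)) with
         | none => out
         | some b => out ++ [[b - 1, PySem.List.pyGetD lst (b - 1) 0],
                             [b, PySem.List.pyGetD lst b 0]]) := by
  intro l
  induction l with
  | nil => intro out _; rfl
  | cons i t ih =>
      intro out h
      by_cases hc : PySem.List.pyGetD lst i 0 < y
      · have hs : stepA lst y out i
            = out ++ [[i - 1, PySem.List.pyGetD lst (i - 1) 0],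
                      [i, PySem.List.pyGetD lst i 0]] := by
          simp [stepA, h, hc]
        have h4 : (out ++ [[i - 1, PySem.List.pyGetD lst (i - 1) 0],
                           [i, PySem.List.pyGetD lst i 0]]).length = 4 := by
          simp [h]
        simp [List.foldl_cons, hs, foldl_stepA_len4 lst y t _ h4, List.find?, hc]
      · have hs : stepA lst y out i = out := by simp [stepA, h, hc]
        simp [List.foldl_cons, hs, ih out h, List.find?, hc]

-- A's loop from start index s equals the two-phase find? normal form from s
lemma main_from (lst : List Int) (y : Int) :
    ∀ (k : Nat) (s : Int), (PySem.List.len lst - s).toNat ≤ k →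
      (PySem.List.pyRange s (PySem.List.len lst) 1).foldl (stepA lst y) [] =
        (match (PySem.List.pyRange s (PySem.List.len lst) 1).find?
            (fun i => decide (y < PySem.List.pyGetD lst i 0)) with
         | none => []
         | some a =>
           [[a - 1, PySem.List.pyGetD lst (a - 1) 0], [a, PySem.List.pyGetD lst a 0]] ++
             (match (PySem.List.pyRange (a + 1) (PySem.List.len lst) 1).find?
                 (fun i => decide (PySem.List.pyGetD lst i 0 < y)) with
              | none => []
              | some b => [[b - 1, PySem.List.pyGetD lst (b - 1) 0],
                           [b, PySem.List.pyGetD lst b 0]])) := by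
  intro k
  induction k with
  | zero =>
      intro s hk
      have hsn : PySem.List.len lst ≤ s := by omega
      rw [PySem.List.pyRange_one_eq_nil hsn]
      rfl
  | succ k ih =>
      intro s hk
      by_cases hlt : s < PySem.List.len lst
      · rw [PySem.List.pyRange_one_cons hlt]
        by_cases hc : y < PySem.List.pyGetD lst s 0
        · have hs : stepA lst y [] s
              = [[s - 1, PySem.List.pyGetD lst (s - 1) 0],
                 [s, PySem.List.pyGetD lst s 0]] := by
            simp [stepA, hc]
          have h2 : ([[s - 1, PySem.List.pyGetD lst (s - 1) 0],
                      [s, PySem.List.pyGetD lst s 0]] : List (List Int)).length = 2 := by simp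
          rw [List.foldl_cons, hs,
            foldl_stepA_len2 lst y (PySem.List.pyRange (s + 1) (PySem.List.len lst) 1) _ h2]
          simp only [List.find?, hc, decide_true]
          cases (PySem.List.pyRange (s + 1) (PySem.List.len lst) 1).find?
              (fun i => decide (PySem.List.pyGetD lst i 0 < y)) with
          | none => simp
          | some b => simp
        · have hs : stepA lst y [] s = [] := by simp [stepA, hc]
          rw [List.foldl_cons, hs, ih (s + 1) (by omega)]
          simp only [List.find?, hc, decide_false]
      · have hsn : PySem.List.len lst ≤ s := by omega
        rw [PySem.List.pyRange_one_eq_nil hsn]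
        rfl

-- foldl min over a list of elements all ≥ x stays at x
lemma foldl_min_of_le (x : Int) :
    ∀ (m : List Int), (∀ z ∈ m, x ≤ z) → m.foldl min x = x := by
  intro m
  induction m with
  | nil => intro _; rfl
  | cons z t ih =>
      intro h
      have hx : min x z = x := min_eq_left (h z (by simp))
      simp only [List.foldl_cons, hx]
      exact ih (fun w hw => h w (by simp [hw]))

-- on a strictly increasing list, min of the filtered elements is the first match
lemma min?_filter_eq_find? (p : Int → Bool) :
    ∀ (l : List Int), l.Pairwise (· < ·) →
      PySem.List.min? (l.filter p) (fun x => x) = l.find? p := by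
  intro l
  induction l with
  | nil => intro _; rfl
  | cons x t ih =>
      intro hp
      by_cases hx : p x
      · have hmem : ∀ z ∈ t.filter p, x ≤ z := by
          intro z hz
          exact le_of_lt ((List.pairwise_cons.mp hp).1 z (List.mem_of_mem_filter hz))
        rw [List.filter_cons_of_pos hx, PySem.List.min?_id_cons,
          foldl_min_of_le x _ hmem, List.find?_cons_of_pos hx]
      · rw [List.filter_cons_of_neg hx, List.find?_cons_of_neg hx,
          ih (List.pairwise_cons.mp hp).2]

-- B's candidate list of upward crossings is the filtered index range
lemma ups_eq (lst : List Int) (y : Int) :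
    ((PySem.List.enumerate lst 0).filter (fun p => decide (y < p.2))).map (fun p => p.1)
      = (PySem.List.pyRange 0 (PySem.List.len lst) 1).filter
          (fun j => decide (y < PySem.List.pyGetD lst j 0)) := by
  rw [PySem.List.enumerate_eq_map_pyRange lst 0, List.filter_map, List.map_map]
  simp [Function.comp_def]

-- B's downward candidates equal the filter of the tail range past a (0 ≤ a)
lemma downs_eq (lst : List Int) (y a : Int) (ha : 0 ≤ a) :
    ((PySem.List.enumerate lst 0).filter (fun p => decide (p.2 < y ∧ a < p.1))).map (fun p => p.1)
      = (PySem.List.pyRange (a + 1) (PySem.List.len lst) 1).filter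
          (fun j => decide (PySem.List.pyGetD lst j 0 < y)) := by
  rw [PySem.List.enumerate_eq_map_pyRange lst 0, List.filter_map, List.map_map]
  simp only [Function.comp_def, List.map_id']
  by_cases hn : a + 1 ≤ PySem.List.len lst
  · rw [PySem.List.pyRange_one_append 0 (a + 1) (PySem.List.len lst) (by omega) hn,
      List.filter_append]
    have hfirst : (PySem.List.pyRange 0 (a + 1) 1).filter
        (fun j => decide (PySem.List.pyGetD lst j 0 < y ∧ a < j)) = [] := by
      apply List.filter_eq_nil_iff.mpr
      intro j hj
      have := (PySem.List.mem_pyRange_one).mp hj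
      simp only [decide_eq_true_eq]
      omega
    rw [hfirst, List.nil_append]
    apply List.filter_congr
    intro j hj
    have := (PySem.List.mem_pyRange_one).mp hj
    rw [decide_eq_decide]
    constructor
    · intro h; exact h.1
    · intro h; exact ⟨h, by omega⟩
  · rw [PySem.List.pyRange_one_eq_nil (show PySem.List.len lst ≤ a + 1 by omega)]
    apply List.filter_eq_nil_iff.mpr
    intro j hj
    have := (PySem.List.mem_pyRange_one).mp hj
    simp only [decide_eq_true_eq]
    omega

-- specialisation of min?_filter_eq_find? to index ranges, in simp-usable form
lemma min?_filter_pyRange (p : Int → Bool) (a b : Int) :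
    PySem.List.min? ((PySem.List.pyRange a b 1).filter p) (fun x => x)
      = (PySem.List.pyRange a b 1).find? p :=
  min?_filter_eq_find? p _ (PySem.List.pairwise_lt_pyRange_one a b)

-- B equals the two-phase find? normal form
lemma altB_eq (lst : List Int) (y : Int) :
    get_surrounding_points_alt lst y =
      (match (PySem.List.pyRange 0 (PySem.List.len lst) 1).find?
          (fun i => decide (y < PySem.List.pyGetD lst i 0)) with
       | none => []
       | some a =>
         [[a - 1, PySem.List.pyGetD lst (a - 1) 0], [a, PySem.List.pyGetD lst a 0]] ++
           (match (PySem.List.pyRange (a + 1) (PySem.List.len lst) 1).find?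
               (fun i => decide (PySem.List.pyGetD lst i 0 < y)) with
            | none => []
            | some b => [[b - 1, PySem.List.pyGetD lst (b - 1) 0],
                         [b, PySem.List.pyGetD lst b 0]])) := by
  unfold get_surrounding_points_alt
  simp only [ups_eq lst y, min?_filter_pyRange]
  cases hfa : (PySem.List.pyRange 0 (PySem.List.len lst) 1).find?
      (fun i => decide (y < PySem.List.pyGetD lst i 0)) with
  | none => rfl
  | some a =>
      have hamem : a ∈ PySem.List.pyRange 0 (PySem.List.len lst) 1 :=
        List.mem_of_find?_eq_some hfa
      have ha : 0 ≤ a := ((PySem.List.mem_pyRange_one).mp hamem).1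
      simp only [downs_eq lst y a ha, min?_filter_pyRange]
      cases (PySem.List.pyRange (a + 1) (PySem.List.len lst) 1).find?
          (fun i => decide (PySem.List.pyGetD lst i 0 < y)) with
      | none => simp [List.flatMap]
      | some b => simp [List.flatMap]

-- ===== VERDICT (by name: the statement is the Claim_ definition above) =====
theorem get_surrounding_points_spec : Claim_equal_get_surrounding_points := by
  unfold Claim_equal_get_surrounding_points
  intro lst y _
  unfold Spec_get_surrounding_points
  rw [getA_eq, main_from lst y (PySem.List.len lst - 0).toNat 0 (le_refl _), altB_eq]
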